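-- pv_equiv track=rewrite | github.com/benquick123/code-profiling | code/batch-2/vse-naloge-brez-testov/DN7-M-239.py | varen_premik
-- ===== SOURCE A (Python) =====
-- def varen_premik(x0, y0, x1, y1, mine):
--     if abs(x0-x1)!=0:
--         if x1>x0:
--             for a in range(x0,x1+1):
--                 if (a,y0)in mine:
--                     return False
--         else:
--             for a in range(x1,x0+1):
--                 if (a,y0)in mine:
--                     return False
--     else:
--         if y1>y0:
--             for a in range(y0,y1+1):
--                 if (x0,a)in mine:
--                     return False
--         else:
--             for a in range(y1,y0+1):
--                 if (x0,a)in mine: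
--                     return False
--     return True
-- ===== SOURCE B (Python) =====
-- def varen_premik(x0, y0, x1, y1, mine):
--     if x0 != x1:
--         lo, hi = min(x0, x1), max(x0, x1)
--         return not any(my == y0 and lo <= mx <= hi for (mx, my) in mine)
--     lo, hi = min(y0, y1), max(y0, y1)
--     return not any(mx == x0 and lo <= my <= hi for (mx, my) in mine)
-- ===== Notes on version B (the rewrite author's own statement) =====
-- stated objective: faster
-- what changed: B scans the mine list once with an inclusive bounds test instead of enumerating every integer point of the path and doing a membership scan per point (preserving A's quirk that a diagonal move only checks the horizontal line at y0).
import Mathlib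
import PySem

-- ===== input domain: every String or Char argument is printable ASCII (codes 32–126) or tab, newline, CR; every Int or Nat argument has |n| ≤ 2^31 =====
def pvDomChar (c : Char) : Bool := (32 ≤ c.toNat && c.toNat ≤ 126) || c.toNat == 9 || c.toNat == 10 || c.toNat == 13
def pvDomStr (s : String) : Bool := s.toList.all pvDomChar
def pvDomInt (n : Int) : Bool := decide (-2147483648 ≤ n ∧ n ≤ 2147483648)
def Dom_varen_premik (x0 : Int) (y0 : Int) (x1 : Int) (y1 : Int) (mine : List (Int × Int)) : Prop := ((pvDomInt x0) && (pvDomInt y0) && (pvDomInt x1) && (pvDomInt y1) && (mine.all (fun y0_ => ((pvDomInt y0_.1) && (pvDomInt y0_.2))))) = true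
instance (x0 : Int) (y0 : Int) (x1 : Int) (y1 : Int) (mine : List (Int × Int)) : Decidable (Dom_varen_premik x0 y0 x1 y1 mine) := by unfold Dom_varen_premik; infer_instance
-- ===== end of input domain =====

-- B replaces A's walk over every integer point of the path (with a membership scan per
-- point) by a single pass over the mine list with an inclusive bounds test; same values.

-- ===== PORT A =====
-- A's 'for a in range(lo, hi): if (a,y0) in mine: return False' loops:
-- an early-return-False loop is exactly 'not any' over the same range.
def varen_premik (x0 : Int) (y0 : Int) (x1 : Int) (y1 : Int) (mine : List (Int × Int)) : Bool :=
  if |x0 - x1| ≠ 0 then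
    if x1 > x0 then
      !(PySem.List.pyRange x0 (x1 + 1) 1).any (fun a => mine.contains (a, y0))
    else
      !(PySem.List.pyRange x1 (x0 + 1) 1).any (fun a => mine.contains (a, y0))
  else
    if y1 > y0 then
      !(PySem.List.pyRange y0 (y1 + 1) 1).any (fun a => mine.contains (x0, a))
    else
      !(PySem.List.pyRange y1 (y0 + 1) 1).any (fun a => mine.contains (x0, a))

-- ===== PORT B =====
def varen_premik_alt (x0 : Int) (y0 : Int) (x1 : Int) (y1 : Int) (mine : List (Int × Int)) : Bool :=
  if x0 ≠ x1 then
    !(mine.any (fun p => p.2 == y0 && (decide (min x0 x1 ≤ p.1) && decide (p.1 ≤ max x0 x1))))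
  else
    !(mine.any (fun p => p.1 == x0 && (decide (min y0 y1 ≤ p.2) && decide (p.2 ≤ max y0 y1))))

-- ===== PRECONDITION & SPEC =====
def Spec_varen_premik (x0 : Int) (y0 : Int) (x1 : Int) (y1 : Int) (mine : List (Int × Int)) (out : Bool) : Prop := out = varen_premik_alt x0 y0 x1 y1 mine
instance (x0 : Int) (y0 : Int) (x1 : Int) (y1 : Int) (mine : List (Int × Int)) (out : Bool) : Decidable (Spec_varen_premik x0 y0 x1 y1 mine out) := by unfold Spec_varen_premik; infer_instance

-- ===== CLAIM (what is proved, stated in full; the proofs are below) =====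
def Claim_equal_varen_premik : Prop := ∀ (x0 : Int) (y0 : Int) (x1 : Int) (y1 : Int) (mine : List (Int × Int)), Dom_varen_premik x0 y0 x1 y1 mine → Spec_varen_premik x0 y0 x1 y1 mine (varen_premik x0 y0 x1 y1 mine)

-- ===== LEMMAS AND PROOFS =====

-- the path-side 'any' over an inclusive range equals the mine-side 'any' with bounds,
-- horizontal version (first coordinate ranges)
theorem pv_any_range_fst (lo hi y0 : Int) (mine : List (Int × Int)) :
    ((PySem.List.pyRange lo (hi + 1) 1).any (fun a => mine.contains (a, y0))) =
      (mine.any (fun p => p.2 == y0 && (decide (lo ≤ p.1) && decide (p.1 ≤ hi)))) := by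
  rw [Bool.eq_iff_iff]
  simp only [List.any_eq_true, PySem.List.mem_pyRange_one, List.contains_iff_mem,
    Bool.and_eq_true, beq_iff_eq, decide_eq_true_eq]
  constructor
  · rintro ⟨a, ⟨h1, h2⟩, hm⟩
    exact ⟨(a, y0), hm, rfl, h1, by omega⟩
  · rintro ⟨⟨px, py⟩, hm, h0, h1, h2⟩
    exact ⟨px, ⟨h1, by omega⟩, h0 ▸ hm⟩

-- vertical version (second coordinate ranges)
theorem pv_any_range_snd (lo hi x0 : Int) (mine : List (Int × Int)) :
    ((PySem.List.pyRange lo (hi + 1) 1).any (fun a => mine.contains (x0, a))) =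
      (mine.any (fun p => p.1 == x0 && (decide (lo ≤ p.2) && decide (p.2 ≤ hi)))) := by
  rw [Bool.eq_iff_iff]
  simp only [List.any_eq_true, PySem.List.mem_pyRange_one, List.contains_iff_mem,
    Bool.and_eq_true, beq_iff_eq, decide_eq_true_eq]
  constructor
  · rintro ⟨a, ⟨h1, h2⟩, hm⟩
    exact ⟨(x0, a), hm, rfl, h1, by omega⟩
  · rintro ⟨⟨px, py⟩, hm, h0, h1, h2⟩
    exact ⟨py, ⟨h1, by omega⟩, h0 ▸ hm⟩

-- ===== VERDICT (by name: the statement is the Claim_ definition above) =====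
theorem varen_premik_spec : Claim_equal_varen_premik := by
  intro x0 y0 x1 y1 mine _
  show varen_premik x0 y0 x1 y1 mine = varen_premik_alt x0 y0 x1 y1 mine
  unfold varen_premik varen_premik_alt
  by_cases hx : x0 = x1
  · subst hx
    rw [if_neg (c := |x0 - x0| ≠ 0) (by simp), if_neg (c := x0 ≠ x0) (by simp)]
    by_cases hy : y1 > y0
    · rw [if_pos hy, pv_any_range_snd]
      have h1 : min y0 y1 = y0 := by omega
      have h2 : max y0 y1 = y1 := by omega
      rw [h1, h2]
    · rw [if_neg hy, pv_any_range_snd]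
      have h1 : min y0 y1 = y1 := by omega
      have h2 : max y0 y1 = y0 := by omega
      rw [h1, h2]
  · rw [if_pos (by simpa [abs_eq_zero, sub_eq_zero] using hx), if_pos hx]
    by_cases hgt : x1 > x0
    · rw [if_pos hgt, pv_any_range_fst]
      have h1 : min x0 x1 = x0 := by omega
      have h2 : max x0 x1 = x1 := by omega
      rw [h1, h2]
    · rw [if_neg hgt, pv_any_range_fst]
      have h1 : min x0 x1 = x1 := by omega
      have h2 : max x0 x1 = x0 := by omega
      rw [h1, h2]
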